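-- pv_equiv track=rewrite | github.com/manwar/perlweeklychallenge-club | challenge-102/roger-bell-west/python/ch-2.py | hcs
-- ===== SOURCE A (Python) =====
-- def hcs(n):
--     s=list()
--     t=list()
--     while 1:
--         s=list()
--         l=0
--         if len(t)>0:
--             s=t.pop()
--             l=sum((0 if i==1 else len(str(i)))+1 for i in s)
--         if l==n:
--             break
--         if l > n:
--             continue
--         c=l
--         while 1:
--             tt=(0 if c==1 else len(str(c)))+l+1
--             if c==tt:
--                 k=s.copy()
--                 k.append(c)
--                 t.append(k)
--             if c > tt:
--                 break
--             c+=1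
--     return ''.join((("" if i==1 else str(i)) + "#") for i in s)
-- ===== SOURCE B (Python) =====
-- def hcs(n):
--     # Each entry c of a self-describing sequence determines its predecessor length
--     # uniquely (l = c - 1 - len(str(c)), or 0 for c == 1), so the sequence ending
--     # at total length n is unique: build it backward, no search needed.
--     s = []
--     m = n
--     while m > 0:
--         s.append(m)
--         m = 0 if m == 1 else m - 1 - len(str(m))
--     s.reverse()
--     return ''.join((("" if i == 1 else str(i)) + "#") for i in s)
-- ===== Notes on version B (the rewrite author's own statement) =====
-- stated objective: faster
-- what changed: A runs an explicit-stack DFS over all candidate digit sequences; B exploits that the validity condition c == len(str(c))+l+1 forces each entry's predecessor length uniquely, so the sequence for n is unique and is built backward from n in one loop with no search.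
import Mathlib
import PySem

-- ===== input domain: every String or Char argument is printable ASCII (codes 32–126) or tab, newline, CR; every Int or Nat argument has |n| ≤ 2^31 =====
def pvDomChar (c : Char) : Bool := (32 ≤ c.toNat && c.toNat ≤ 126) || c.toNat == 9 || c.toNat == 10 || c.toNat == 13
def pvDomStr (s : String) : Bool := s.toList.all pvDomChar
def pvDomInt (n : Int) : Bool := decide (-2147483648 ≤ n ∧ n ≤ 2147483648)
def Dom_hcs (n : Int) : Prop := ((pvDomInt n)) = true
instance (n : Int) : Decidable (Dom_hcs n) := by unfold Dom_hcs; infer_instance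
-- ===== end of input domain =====

-- B replaces A's explicit-stack DFS by a direct backward construction: each entry c of a valid
-- sequence determines its predecessor length uniquely, so the sequence for n is unique and is
-- built back-to-front with no search (objective: faster).

-- shared helpers: both Python sources contain the identical expressions
-- len(str(c)), (0 if i==1 else len(str(i))), and ''.join((("" if i==1 else str(i)) + "#") …)
def pvStrLen (c : Int) : Int := PySem.Str.len (PySem.Int.toStr c)
def pvWlen (c : Int) : Int := if c = 1 then 0 else pvStrLen c
def pvFmt (s : List Int) : String :=
  PySem.Str.join "" (s.map (fun i => (if i = 1 then "" else PySem.Int.toStr i) ++ "#"))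

-- ===== PORT A =====
-- l = sum((0 if i==1 else len(str(i)))+1 for i in s)
def pvLsum (s : List Int) : Int := (s.map (fun i => pvWlen i + 1)).sum

-- the inner 'while 1: tt=…; if c==tt: t.append(s+[c]); if c>tt: break; c+=1' loop
-- (stack top at the head of the list; the fuel argument is only a totality guard — 64 is
-- never exhausted on inputs the claim covers)
def innerA (fuel : Nat) (c l : Int) (s : List Int) (t : List (List Int)) : List (List Int) :=
  match fuel with
  | 0 => t
  | f+1 =>
    let tt := pvWlen c + l + 1
    let t' := if c = tt then (s ++ [c]) :: t else t
    if c > tt then t' else innerA f (c+1) l s t'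

-- the outer 'while 1' loop; one fuel unit per iteration (totality guard only)
def loopA (n : Int) (fuel : Nat) (t : List (List Int)) : String :=
  match fuel with
  | 0 => ""
  | f+1 =>
    match t with
    | [] =>
      if (0:Int) = n then pvFmt []
      else if (0:Int) > n then loopA n f []
      else loopA n f (innerA 64 0 0 [] [])
    | s :: rest =>
      let l := pvLsum s
      if l = n then pvFmt s
      else if l > n then loopA n f rest
      else loopA n f (innerA 64 l l s rest)

def hcs (n : Int) : String := loopA n (65 ^ (n.toNat + 3)) []

-- ===== PORT B =====
-- (cited by the termination proofs of bloop and pvChain)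
theorem pvStrLen_nonneg (m : Int) : 0 ≤ pvStrLen m := by
  simp [pvStrLen, PySem.Str.len_eq]

-- m = 0 if m == 1 else m - 1 - len(str(m))
def pvParent (m : Int) : Int := if m = 1 then 0 else m - 1 - pvStrLen m

-- the 'while m > 0: s.append(m); m = …' loop
def bloop (m : Int) (acc : List Int) : List Int :=
  if 0 < m then bloop (pvParent m) (acc ++ [m]) else acc
termination_by m.toNat
decreasing_by
  have h1 := pvStrLen_nonneg m
  unfold pvParent; split <;> omega

def hcs_alt (n : Int) : String := pvFmt (bloop n []).reverse

-- ===== PRECONDITION & SPEC =====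
-- Pre_ excludes n < 0, where Python A never returns (its outer loop repeats 'continue' forever).
def Pre_hcs (n : Int) : Prop := 0 ≤ n
instance (n : Int) : Decidable (Pre_hcs n) := by unfold Pre_hcs; infer_instance
def pvWitness_hcs : Int := (5)
def Spec_hcs (n : Int) (out : String) : Prop := out = hcs_alt n
instance (n : Int) (out : String) : Decidable (Spec_hcs n out) := by unfold Spec_hcs; infer_instance

-- ===== CLAIM (what is proved, stated in full; the proofs are below) =====
def Claim_equal_hcs : Prop := ∀ (n : Int), Dom_hcs n → Pre_hcs n → Spec_hcs n (hcs n)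

-- ===== LEMMAS AND PROOFS =====

-- ---- length of the decimal representation ----
def pvDg (m : Nat) : Nat := (Nat.toDigits 10 m).length

theorem pvTdcFuel (f1 : Nat) : ∀ (f2 n : Nat) (l : List Char), n < f1 → n < f2 →
    Nat.toDigitsCore 10 f1 n l = Nat.toDigitsCore 10 f2 n l := by
  induction f1 with
  | zero => intro f2 n l h1 h2; omega
  | succ f ih =>
    intro f2 n l h1 h2
    match f2, h2 with
    | f2'+1, h2 =>
      simp only [Nat.toDigitsCore]
      by_cases hz : n / 10 = 0
      · simp [hz]
      · simp only [hz, if_false]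
        exact ih f2' (n / 10) _ (by omega) (by omega)

theorem pvDg_step (m : Nat) (h : 10 ≤ m) : pvDg m = pvDg (m / 10) + 1 := by
  unfold pvDg Nat.toDigits
  have hz : m / 10 ≠ 0 := by omega
  simp only [Nat.toDigitsCore, hz, if_false]
  rw [pvTdcFuel m (m/10 + 1) (m/10) _ (by omega) (by omega)]
  rw [Nat.toDigitsCore_lens_eq]
  simp only [Nat.toDigitsCore]

theorem pvDg_small (m : Nat) (h : m < 10) : pvDg m = 1 := by
  unfold pvDg; interval_cases m <;> decide

theorem pvDg_pos (m : Nat) : 1 ≤ pvDg m := by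
  by_cases h : m < 10
  · rw [pvDg_small m h]
  · rw [pvDg_step m (by omega)]; omega

theorem pvDg_lt_pow (m : Nat) : m < 10 ^ pvDg m := by
  induction m using Nat.strong_induction_on with
  | _ m ih =>
    by_cases h : m < 10
    · rw [pvDg_small m h]; simpa using h
    · rw [pvDg_step m (by omega)]
      have h2 := ih (m / 10) (by omega)
      calc m < 10 * (m / 10 + 1) := by omega
        _ ≤ 10 * 10 ^ pvDg (m / 10) := by omega
        _ = 10 ^ (pvDg (m / 10) + 1) := by ring

theorem pvDg_le (m e : Nat) (he : 0 < e) (h : m < 10 ^ e) : pvDg m ≤ e :=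
  Nat.toDigits_length 10 m e he h

theorem pvDg_succ (m : Nat) : pvDg (m + 1) ≤ pvDg m + 1 := by
  apply pvDg_le _ _ (by have := pvDg_pos m; omega)
  have h1 := pvDg_lt_pow m
  have h2 : 10 ^ pvDg m < 10 ^ (pvDg m + 1) := by
    have : (10:Nat) ^ pvDg m ≥ 1 := Nat.one_le_pow _ _ (by omega)
    calc (10:Nat) ^ pvDg m < 10 * 10 ^ pvDg m := by omega
      _ = 10 ^ (pvDg m + 1) := by ring
  omega

theorem pvDg_lip (a b : Nat) (h : a ≤ b) : pvDg b ≤ pvDg a + (b - a) := by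
  induction b with
  | zero => simp_all
  | succ b ih =>
    by_cases hab : a = b + 1
    · subst hab; omega
    · have h1 := ih (by omega)
      have h2 := pvDg_succ b
      omega

theorem pvStrLen_eq_dg (c : Int) (h : 0 ≤ c) : pvStrLen c = (pvDg c.toNat : Int) := by
  simp [pvStrLen, PySem.Str.len_eq, PySem.Int.toList_toStr, PySem.Int.toChars, pvDg,
    show ¬ c < 0 by omega]

theorem pvWlen_nonneg (c : Int) : 0 ≤ pvWlen c := by
  unfold pvWlen; split
  · omega
  · exact pvStrLen_nonneg c

-- ---- the valid-successor condition and the successors the inner loop collects ----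
def pvCond (c l : Int) : Prop := c = pvWlen c + l + 1

-- successors collected scanning upward from c (mirrors innerA without the stack)
def pvCs (fuel : Nat) (c l : Int) : List Int :=
  match fuel with
  | 0 => []
  | f+1 =>
    let tt := pvWlen c + l + 1
    if c = tt then c :: pvCs f (c+1) l
    else if c > tt then []
    else pvCs f (c+1) l

theorem innerA_eq (f : Nat) : ∀ (c l : Int) (s : List Int) (t : List (List Int)),
    innerA f c l s t = ((pvCs f c l).map (fun x => s ++ [x])).reverse ++ t := by
  induction f with
  | zero => intro c l s t; simp [innerA, pvCs]
  | succ f ih =>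
    intro c l s t
    simp only [innerA, pvCs]
    by_cases h1 : c = pvWlen c + l + 1
    · have h2 : ¬ c > pvWlen c + l + 1 := by omega
      rw [if_neg h2, if_pos h1, if_pos h1, ih]
      simp
    · simp only [if_neg h1]
      by_cases h2 : c > pvWlen c + l + 1
      · simp [h2]
      · simp [h2, ih]

theorem pvCs_sound (f : Nat) : ∀ (c l x : Int), x ∈ pvCs f c l → pvCond x l := by
  induction f with
  | zero => intro c l x h; simp [pvCs] at h
  | succ f ih =>
    intro c l x h
    simp only [pvCs] at h
    by_cases h1 : c = pvWlen c + l + 1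
    · rw [if_pos h1] at h
      rcases List.mem_cons.1 h with h | h
      · subst h; exact h1
      · exact ih _ _ _ h
    · rw [if_neg h1] at h
      by_cases h2 : c > pvWlen c + l + 1
      · simp [h2] at h
      · rw [if_neg h2] at h; exact ih _ _ _ h

theorem pvCs_length (f : Nat) : ∀ (c l : Int), (pvCs f c l).length ≤ f := by
  induction f with
  | zero => intro c l; simp [pvCs]
  | succ f ih =>
    intro c l
    simp only [pvCs]
    split
    · simpa using ih (c+1) l
    · split
      · simp
      · have := ih (c+1) l; simpa using Nat.le_succ_of_le this

-- the scan never breaks strictly below a valid successor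
theorem pvNoBreak (l c cw : Int) (hl : 0 ≤ l) (hc : l ≤ c) (hlt : c < cw)
    (hcond : pvCond cw l) : c ≤ pvWlen c + l + 1 := by
  have hwnn := pvWlen_nonneg c
  by_cases hcw1 : cw = 1
  · subst hcw1
    unfold pvCond pvWlen at hcond
    rw [if_pos rfl] at hcond
    omega
  · unfold pvCond pvWlen at hcond
    rw [if_neg hcw1] at hcond
    by_cases hc1 : c = 1
    · subst hc1; unfold pvWlen; rw [if_pos rfl]; omega
    · unfold pvWlen; rw [if_neg hc1]
      have h0c : 0 ≤ c := by omega
      rw [pvStrLen_eq_dg c h0c]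
      rw [pvStrLen_eq_dg cw (by omega)] at hcond
      have hlip := pvDg_lip c.toNat cw.toNat (by omega)
      omega

theorem pvCs_mem (f : Nat) : ∀ (c l cw : Int), 0 ≤ l → l ≤ c → c ≤ cw → pvCond cw l →
    cw ≤ 2147483648 → (cw - c).toNat < f → cw ∈ pvCs f c l := by
  induction f with
  | zero => intro c l cw _ _ _ _ _ h; omega
  | succ f ih =>
    intro c l cw hl hlc hccw hcond hbound hfuel
    simp only [pvCs]
    by_cases heq : c = cw
    · subst heq
      rw [if_pos (show c = pvWlen c + l + 1 from hcond)]
      exact List.mem_cons_self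
    · have hlt : c < cw := by omega
      have hnb := pvNoBreak l c cw hl hlc hlt hcond
      by_cases h1 : c = pvWlen c + l + 1
      · rw [if_pos h1]
        exact List.mem_cons_of_mem _ (ih (c+1) l cw hl (by omega) (by omega) hcond hbound (by omega))
      · rw [if_neg h1, if_neg (by omega)]
        exact ih (c+1) l cw hl (by omega) (by omega) hcond hbound (by omega)

-- ---- valid stack entries and uniqueness of the full sequence ----
inductive pvVC : List Int → Int → Prop
  | nil : pvVC [] 0
  | snoc {s : List Int} {l c : Int} : pvVC s l → pvCond c l → pvVC (s ++ [c]) c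

theorem pvCond_gt {c l : Int} (h : pvCond c l) : l < c := by
  have := pvWlen_nonneg c
  unfold pvCond at h; omega

theorem pvVC_nonneg {s : List Int} {l : Int} (h : pvVC s l) : 0 ≤ l := by
  induction h with
  | nil => omega
  | snoc hvc hcond ih => have := pvCond_gt hcond; omega

theorem pvLsum_append (s : List Int) (c : Int) :
    pvLsum (s ++ [c]) = pvLsum s + (pvWlen c + 1) := by
  simp [pvLsum]

-- the canonical sequence, built backward through the forced predecessor
def pvChain (m : Int) : List Int :=
  if 0 < m then pvChain (pvParent m) ++ [m] else []
termination_by m.toNat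
decreasing_by
  have h1 := pvStrLen_nonneg m
  unfold pvParent; split <;> omega

theorem pvVC_unique {s : List Int} {m : Int} (h : pvVC s m) : s = pvChain m := by
  induction h with
  | nil => rw [pvChain]; simp
  | snoc hvc hcond ih =>
    rename_i s' l c
    have hlc := pvCond_gt hcond
    have hl0 := pvVC_nonneg hvc
    have hc0 : 0 < c := by omega
    rw [pvChain, if_pos hc0]
    have hpar : pvParent c = l := by
      unfold pvParent
      unfold pvCond pvWlen at hcond
      by_cases h1 : c = 1
      · rw [if_pos h1]; rw [if_pos h1] at hcond; omega
      · rw [if_neg h1]; rw [if_neg h1] at hcond; omega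
    rw [hpar, ← ih]

theorem bloop_eq (m : Int) (acc : List Int) : bloop m acc = acc ++ (pvChain m).reverse := by
  induction m, acc using bloop.induct with
  | case1 m acc h ih =>
    rw [bloop, if_pos h, pvChain, if_pos h, ih]
    simp
  | case2 m acc h =>
    rw [bloop, if_neg h, pvChain, if_neg h]
    simp

-- ---- reachability of level n from a level l ----
inductive pvReach (n : Int) : Int → Prop
  | done : pvReach n n
  | step {l c : Int} : pvCond c l → pvReach n c → pvReach n l

theorem pvReach_le {n l : Int} (h : pvReach n l) : l ≤ n := by
  induction h with
  | done => omega
  | step hcond hr ih => have := pvCond_gt hcond; omega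

theorem pvReach_trans {a b c : Int} (h1 : pvReach b a) (h2 : pvReach c b) : pvReach c a := by
  induction h1 with
  | done => exact h2
  | step hcond hr ih => exact pvReach.step hcond ih

theorem pvRootReach (N : Nat) : ∀ (m : Int), 0 ≤ m → m ≤ 2147483648 → m.toNat ≤ N →
    pvReach m 0 := by
  induction N with
  | zero =>
    intro m h0 h1 h2
    have : m = 0 := by omega
    subst this; exact pvReach.done
  | succ N ih =>
    intro m h0 h1 h2
    by_cases hm0 : m = 0
    · subst hm0; exact pvReach.done
    · by_cases hm1 : m = 1
      · subst hm1
        exact pvReach.step (by unfold pvCond pvWlen; simp) pvReach.done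
      · have hm2 : 2 ≤ m := by omega
        have hstr : pvStrLen m = (pvDg m.toNat : Int) := pvStrLen_eq_dg m (by omega)
        have hdgle : pvDg m.toNat ≤ 10 := pvDg_le m.toNat 10 (by omega) (by omega)
        have hdgpos := pvDg_pos m.toNat
        have hlb : 1 ≤ pvStrLen m ∧ pvStrLen m ≤ m - 1 := by
          constructor
          · omega
          · by_cases h10 : m < 10
            · rw [hstr, pvDg_small m.toNat (by omega)]; omega
            · by_cases h100 : m < 100
              · have : pvDg m.toNat ≤ 2 := pvDg_le m.toNat 2 (by omega) (by omega)
                omega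
              · omega
        have hcond : pvCond m (pvParent m) := by
          unfold pvCond pvWlen pvParent
          rw [if_neg hm1, if_neg hm1]; omega
        have hpar0 : 0 ≤ pvParent m := by unfold pvParent; rw [if_neg hm1]; omega
        have hparlt : pvParent m < m := by unfold pvParent; rw [if_neg hm1]; omega
        have hreach0 : pvReach (pvParent m) 0 := ih (pvParent m) hpar0 (by omega) (by omega)
        exact pvReach_trans hreach0 (pvReach.step hcond pvReach.done)

-- ---- the decreasing potential of the DFS stack and the main loop invariant ----
def pvPhi (n : Int) (t : List (List Int)) : Nat :=
  (t.map (fun s => 65 ^ ((n + 2 - pvLsum s).toNat))).sum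

theorem pvCond_fuel {c l : Int} (h : pvCond c l) (hc : c ≤ 2147483648) (hl : 0 ≤ l) :
    (c - l).toNat < 64 := by
  have hw := pvWlen_nonneg c
  have hgt := pvCond_gt h
  have hwb : pvWlen c ≤ 11 := by
    unfold pvWlen
    split
    · omega
    · rw [pvStrLen_eq_dg c (by omega)]
      have := pvDg_le c.toNat 10 (by omega) (by omega)
      omega
  unfold pvCond at h
  omega

theorem pvChild_mem {c l : Int} (h : pvCond c l) (hc : c ≤ 2147483648) (hl : 0 ≤ l) :
    c ∈ pvCs 64 l l := by
  have := pvCond_gt h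
  exact pvCs_mem 64 l l c hl le_rfl (by omega) h hc (pvCond_fuel h hc hl)

theorem pvPhi_children (n : Int) (s : List Int) (rest : List (List Int)) (l : Int)
    (hls : pvLsum s = l) (hln : l < n) :
    pvPhi n (((pvCs 64 l l).map (fun x => s ++ [x])).reverse ++ rest) + 65 ^ ((n + 1 - l).toNat) ≤
      pvPhi n ((s :: rest)) := by
  have hsum : pvPhi n (((pvCs 64 l l).map (fun x => s ++ [x])).reverse ++ rest)
      = ((pvCs 64 l l).map (fun c => 65 ^ ((n + 2 - pvLsum (s ++ [c])).toNat))).sum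
          + pvPhi n rest := by
    unfold pvPhi
    rw [List.map_append, List.sum_append, List.map_reverse, List.sum_reverse, List.map_map]
    rfl
  rw [hsum]
  have hbound : ((pvCs 64 l l).map (fun c => 65 ^ ((n + 2 - pvLsum (s ++ [c])).toNat))).sum
      ≤ 64 * 65 ^ ((n + 1 - l).toNat) := by
    have h1 : ∀ x ∈ (pvCs 64 l l).map (fun c => 65 ^ ((n + 2 - pvLsum (s ++ [c])).toNat)),
        x ≤ 65 ^ ((n + 1 - l).toNat) := by
      intro x hx
      rcases List.mem_map.1 hx with ⟨c, hc, rfl⟩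
      have hcond := pvCs_sound 64 l l c hc
      have hgt := pvCond_gt hcond
      apply Nat.pow_le_pow_right (by omega)
      rw [pvLsum_append, hls]
      unfold pvCond at hcond
      omega
    calc ((pvCs 64 l l).map (fun c => 65 ^ ((n + 2 - pvLsum (s ++ [c])).toNat))).sum
        ≤ ((pvCs 64 l l).map (fun c => 65 ^ ((n + 2 - pvLsum (s ++ [c])).toNat))).length
            • 65 ^ ((n + 1 - l).toNat) := List.sum_le_card_nsmul _ _ h1
      _ ≤ 64 * 65 ^ ((n + 1 - l).toNat) := by
          rw [List.length_map, smul_eq_mul]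
          exact Nat.mul_le_mul_right _ (pvCs_length 64 l l)
  have hhead : pvPhi n (s :: rest) = 65 ^ ((n + 2 - l).toNat) + pvPhi n rest := by
    unfold pvPhi; simp only [List.map_cons, List.sum_cons, hls]
  rw [hhead]
  have he : (n + 2 - l).toNat = (n + 1 - l).toNat + 1 := by omega
  rw [he, pow_succ]
  have hX : 1 ≤ 65 ^ ((n + 1 - l).toNat) := Nat.one_le_pow _ _ (by omega)
  omega

theorem pvMain (n : Int) (hn0 : 0 ≤ n) (hn1 : n ≤ 2147483648) :
    ∀ (fuel : Nat) (t : List (List Int)),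
    (∀ s ∈ t, pvVC s (pvLsum s)) → (∃ s ∈ t, pvReach n (pvLsum s)) → pvPhi n t < fuel →
    loopA n fuel t = pvFmt (pvChain n) := by
  intro fuel
  induction fuel with
  | zero => intro t _ _ h; omega
  | succ f ih =>
    intro t hInv hWit hPhi
    match t with
    | [] => simp at hWit
    | s :: rest =>
      have hVCs := hInv s (List.mem_cons_self)
      simp only [loopA]
      by_cases hln : pvLsum s = n
      · rw [if_pos hln]
        rw [pvVC_unique hVCs, hln]
      · rw [if_neg hln]
        by_cases hgt : pvLsum s > n
        · rw [if_pos hgt]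
          apply ih
          · intro s' hs'; exact hInv s' (List.mem_cons_of_mem _ hs')
          · rcases hWit with ⟨s', hs', hr⟩
            rcases List.mem_cons.1 hs' with rfl | hs'
            · have := pvReach_le hr; omega
            · exact ⟨s', hs', hr⟩
          · have : pvPhi n (s :: rest) = 65 ^ ((n + 2 - pvLsum s).toNat) + pvPhi n rest := rfl
            have h1 : 1 ≤ 65 ^ ((n + 2 - pvLsum s).toNat) := Nat.one_le_pow _ _ (by omega)
            omega
        · rw [if_neg hgt]
          have hlt : pvLsum s < n := by omega
          have hl0 : 0 ≤ pvLsum s := pvVC_nonneg hVCs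
          rw [innerA_eq]
          have hInv' : ∀ s' ∈ ((pvCs 64 (pvLsum s) (pvLsum s)).map
              (fun x => s ++ [x])).reverse ++ rest, pvVC s' (pvLsum s') := by
            intro s' hs'
            rcases List.mem_append.1 hs' with hs' | hs'
            · rw [List.mem_reverse] at hs'
              rcases List.mem_map.1 hs' with ⟨c, hc, rfl⟩
              have hcond := pvCs_sound 64 _ _ c hc
              have hvc := pvVC.snoc hVCs hcond
              have : pvLsum (s ++ [c]) = c := by
                rw [pvLsum_append]
                unfold pvCond at hcond; omega
              rw [this]; exact hvc
            · exact hInv s' (List.mem_cons_of_mem _ hs')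
          apply ih _ hInv'
          · rcases hWit with ⟨s', hs', hr⟩
            rcases List.mem_cons.1 hs' with rfl | hs'
            · rcases hr with _ | ⟨hcond, hrc⟩
              · omega
              · rename_i c
                have hcn := pvReach_le hrc
                have hmem := pvChild_mem hcond (by omega) hl0
                refine ⟨s' ++ [c], ?_, ?_⟩
                · rw [List.mem_append, List.mem_reverse]
                  exact Or.inl (List.mem_map.2 ⟨c, hmem, rfl⟩)
                · have : pvLsum (s' ++ [c]) = c := by
                    rw [pvLsum_append]
                    unfold pvCond at hcond; omega
                  rw [this]; exact hrc
            · exact ⟨s', by simp [hs'], hr⟩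
          · have := pvPhi_children n s rest (pvLsum s) rfl hlt
            have hX : 1 ≤ 65 ^ ((n + 1 - pvLsum s).toNat) := Nat.one_le_pow _ _ (by omega)
            omega

-- ===== VERDICT (by name: the statement is the Claim_ definition above) =====
theorem hcs_spec : Claim_equal_hcs := by
  intro n hdom hpre
  unfold Dom_hcs pvDomInt at hdom
  rw [decide_eq_true_iff] at hdom
  have hn1 : n ≤ 2147483648 := hdom.2
  have hn0 : 0 ≤ n := hpre
  unfold Spec_hcs hcs_alt
  rw [bloop_eq]
  simp only [List.nil_append, List.reverse_reverse]
  obtain ⟨f, hf⟩ : ∃ f, 65 ^ (n.toNat + 3) = f + 1 :=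
    ⟨65 ^ (n.toNat + 3) - 1, by
      have : 0 < 65 ^ (n.toNat + 3) := Nat.one_le_pow _ _ (by omega); omega⟩
  unfold hcs
  rw [hf]
  simp only [loopA]
  by_cases hn : n = 0
  · rw [if_pos (by omega)]
    subst hn
    rw [pvChain]
    simp
  · rw [if_neg (by omega), if_neg (by omega)]
    rw [innerA_eq]
    apply pvMain n hn0 hn1
    · intro s' hs'
      simp only [List.append_nil] at hs'
      rw [List.mem_reverse] at hs'
      rcases List.mem_map.1 hs' with ⟨c, hc, rfl⟩
      have hcond := pvCs_sound 64 _ _ c hc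
      have hvc := pvVC.snoc pvVC.nil hcond
      have : pvLsum ([] ++ [c]) = c := by
        rw [pvLsum_append]
        unfold pvCond at hcond
        simp [pvLsum]
        omega
      rw [this]; exact hvc
    · have hr0 : pvReach n 0 := pvRootReach n.toNat n hn0 hn1 le_rfl
      rcases hr0 with _ | ⟨hcond, hrc⟩
      · omega
      · rename_i c
        have hcn := pvReach_le hrc
        have hmem := pvChild_mem hcond (by omega) le_rfl
        refine ⟨[] ++ [c], ?_, ?_⟩
        · simp only [List.append_nil]
          rw [List.mem_reverse]
          exact List.mem_map.2 ⟨c, hmem, rfl⟩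
        · have : pvLsum ([] ++ [c]) = c := by
            rw [pvLsum_append]
            unfold pvCond at hcond
            simp [pvLsum]
            omega
          rw [this]; exact hrc
    · have hsum : pvPhi n (((pvCs 64 0 0).map (fun x => [] ++ [x])).reverse ++ []) ≤
          64 * 65 ^ (n.toNat + 1) := by
        unfold pvPhi
        rw [List.append_nil, List.map_reverse, List.sum_reverse, List.map_map]
        have h1 : ∀ x ∈ (pvCs 64 0 0).map (fun c => 65 ^ ((n + 2 - pvLsum ([] ++ [c])).toNat)),
            x ≤ 65 ^ (n.toNat + 1) := by
          intro x hx
          rcases List.mem_map.1 hx with ⟨c, hc, rfl⟩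
          have hcond := pvCs_sound 64 _ _ c hc
          have hgt := pvCond_gt hcond
          apply Nat.pow_le_pow_right (by omega)
          rw [pvLsum_append]
          simp [pvLsum]
          unfold pvCond at hcond
          omega
        calc ((pvCs 64 0 0).map (fun c => 65 ^ ((n + 2 - pvLsum ([] ++ [c])).toNat))).sum
            ≤ _ • (65 ^ (n.toNat + 1)) := List.sum_le_card_nsmul _ _ h1
          _ ≤ 64 * 65 ^ (n.toNat + 1) := by
              rw [List.length_map, smul_eq_mul]
              exact Nat.mul_le_mul_right _ (pvCs_length 64 0 0)
      have hpow : 64 * 65 ^ (n.toNat + 1) < f := by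
        have : 65 ^ (n.toNat + 3) = 65 ^ (n.toNat + 1) * 4225 := by ring
        have hX : 1 ≤ 65 ^ (n.toNat + 1) := Nat.one_le_pow _ _ (by omega)
        omega
      omega
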